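-- pv_equiv track=rewrite | github.com/valentina-zhekova/Hack-Bulgaria-Programming-101 | week0/part 2/prepareMeal.py | spam_condition
-- ===== SOURCE A (Python) =====
-- def spam_condition(number):
--     start = 1
--     power = 0
--     n = 0
--     while start <= number:
--         if number % start == 0 and start != 1:
--             n = power
--         start *= 3
--         power += 1
--     return n
-- ===== SOURCE B (Python) =====
-- def spam_condition(number):
--     if number <= 0:
--         return 0
--     n = 0
--     while number % 3 == 0:
--         number //= 3
--         n += 1
--     return n
-- ===== Notes on version B (the rewrite author's own statement) =====
-- stated objective: alternative
-- what changed: B computes the 3-adic valuation by repeatedly dividing the number out by its factors, instead of generating each successive power and testing the number's divisibility by it up to the number itself.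
import Mathlib
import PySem

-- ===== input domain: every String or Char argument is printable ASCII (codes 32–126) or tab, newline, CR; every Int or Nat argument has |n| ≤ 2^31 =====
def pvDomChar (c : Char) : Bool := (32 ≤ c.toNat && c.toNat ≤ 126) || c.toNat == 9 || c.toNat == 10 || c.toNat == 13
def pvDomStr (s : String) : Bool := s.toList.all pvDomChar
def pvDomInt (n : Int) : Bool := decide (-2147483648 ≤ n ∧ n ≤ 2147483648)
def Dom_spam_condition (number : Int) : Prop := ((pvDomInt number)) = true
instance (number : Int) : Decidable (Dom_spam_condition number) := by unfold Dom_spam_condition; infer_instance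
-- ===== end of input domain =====

-- B computes the same 3-adic valuation by repeatedly dividing the number by its factors instead of scanning all powers up to it (objective: alternative algorithm).

-- ===== PORT A =====
-- A's while loop; the extra conjunct '1 ≤ start' is a totality guard only: start begins at 1
-- and only triples, so it is always true at every actual call.
def spamLoopA (number start power n : Int) : Int :=
  if h : start ≤ number ∧ 1 ≤ start then
    spamLoopA number (start * 3) (power + 1)
      (if PySem.Int.mod number start = 0 ∧ start ≠ 1 then power else n)
  else n
termination_by (number + 1 - start).toNat
decreasing_by omega

def spam_condition (number : Int) : Int := spamLoopA number 1 0 0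

-- ===== PORT B =====
-- B's while loop; the extra conjunct '1 ≤ number' is a totality guard only: B enters the loop
-- only after the 'number <= 0' early return, and number // 3 stays positive while number % 3 == 0.
def spamLoopB (number n : Int) : Int :=
  if h : 1 ≤ number ∧ PySem.Int.mod number 3 = 0 then
    spamLoopB (PySem.Int.floordiv number 3) (n + 1)
  else n
termination_by number.toNat
decreasing_by
  obtain ⟨h1, h2⟩ := h
  rw [PySem.Int.mod_eq_emod_of_pos (by omega)] at h2
  rw [PySem.Int.floordiv_eq_ediv_of_pos (by omega)]
  omega

def spam_condition_alt (number : Int) : Int :=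
  if number ≤ 0 then 0 else spamLoopB number 0

-- ===== PRECONDITION & SPEC =====
def Spec_spam_condition (number : Int) (out : Int) : Prop := out = spam_condition_alt number
instance (number : Int) (out : Int) : Decidable (Spec_spam_condition number out) := by unfold Spec_spam_condition; infer_instance

-- ===== CLAIM (what is proved, stated in full; the proofs are below) =====
def Claim_equal_spam_condition : Prop := ∀ (number : Int), Dom_spam_condition number → Spec_spam_condition number (spam_condition number)

-- ===== LEMMAS AND PROOFS =====

-- ghost Nat-valued mirror of B's loop, for reasoning
def valAux (m : Int) : Nat :=
  if h : 1 ≤ m ∧ m % 3 = 0 then valAux (m / 3) + 1 else 0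
termination_by m.toNat
decreasing_by omega

theorem spamLoopB_eq_valAux (m : Int) (n : Int) :
    spamLoopB m n = n + (valAux m : Int) := by
  induction m using valAux.induct generalizing n with
  | case1 m h ih =>
    rw [spamLoopB, valAux]
    have h' : 1 ≤ m ∧ PySem.Int.mod m 3 = 0 := by
      refine ⟨h.1, ?_⟩
      rw [PySem.Int.mod_eq_emod_of_pos (by norm_num)]; exact h.2
    simp only [h, and_self, h', dif_pos]
    rw [PySem.Int.floordiv_eq_ediv_of_pos (by norm_num)]
    rw [ih]
    push_cast; ring
  | case2 m h =>
    have h' : ¬ (1 ≤ m ∧ PySem.Int.mod m 3 = 0) := by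
      intro hc
      exact h ⟨hc.1, by rw [← PySem.Int.mod_eq_emod_of_pos (a := m) (by norm_num)]; exact hc.2⟩
    rw [spamLoopB, dif_neg h', valAux, dif_neg h]
    simp

theorem valAux_dvd (m : Int) (hm : 1 ≤ m) :
    (3 : Int) ^ (valAux m) ∣ m ∧ ¬ (3 : Int) ^ (valAux m + 1) ∣ m := by
  induction m using valAux.induct with
  | case1 m h ih =>
    rw [valAux]; simp only [h, and_self, dif_pos]
    obtain ⟨h1, h2⟩ := h
    have hq : 1 ≤ m / 3 := by omega
    obtain ⟨hd, hnd⟩ := ih hq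
    have hmeq : m = 3 * (m / 3) := by omega
    set V := valAux (m / 3) with hV
    obtain ⟨c, hc⟩ := hd
    constructor
    · exact ⟨c, by rw [hmeq, hc, pow_succ]; ring⟩
    · rintro ⟨d, hdd⟩
      apply hnd
      refine ⟨d, ?_⟩
      have h3 : (3 : Int) * (m / 3) = 3 * (3 ^ (V + 1) * d) := by
        rw [← hmeq, hdd, pow_succ, pow_succ]; ring
      exact mul_left_cancel₀ (show (3:Int) ≠ 0 by norm_num) h3
  | case2 m h =>
    rw [valAux, dif_neg h]
    have h2 : ¬ m % 3 = 0 := by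
      intro hc; exact h ⟨hm, hc⟩
    constructor
    · simp
    · rintro ⟨d, hdd⟩
      apply h2
      norm_num at hdd
      omega

theorem dvd_iff_le_valAux (m : Int) (hm : 1 ≤ m) (k : Nat) :
    (3 : Int) ^ k ∣ m ↔ k ≤ valAux m := by
  obtain ⟨hd, hnd⟩ := valAux_dvd m hm
  constructor
  · intro hk
    by_contra hlt
    exact hnd (dvd_trans (pow_dvd_pow 3 (by omega)) hk)
  · intro hk
    exact dvd_trans (pow_dvd_pow 3 hk) hd

-- A's loop invariant, for positive number
theorem spamLoopA_eq (number : Int) (hm : 1 ≤ number) (p : Nat) (n : Int) :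
    spamLoopA number (3 ^ p) p n =
      if p ≤ valAux number ∧ 1 ≤ valAux number then (valAux number : Int) else n := by
  generalize hv : valAux number = v
  induction hk : (number + 1 - 3 ^ p).toNat using Nat.strong_induction_on generalizing p n with
  | _ fuel ih =>
  subst hk
  have hpow1 : (1 : Int) ≤ 3 ^ p := one_le_pow₀ (by norm_num)
  rw [spamLoopA]
  by_cases hle : (3 : Int) ^ p ≤ number
  · simp only [hle, hpow1, and_self, dif_pos]
    have hcond : (PySem.Int.mod number (3 ^ p) = 0 ∧ (3:Int) ^ p ≠ 1) ↔ (p ≤ v ∧ p ≠ 0) := by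
      rw [PySem.Int.mod_eq_zero_iff_dvd, dvd_iff_le_valAux number hm p, hv]
      constructor
      · rintro ⟨h1, h2⟩
        refine ⟨h1, fun hp0 => h2 (by rw [hp0]; norm_num)⟩
      · rintro ⟨h1, h2⟩
        refine ⟨h1, fun hc => h2 ?_⟩
        by_contra hne
        have : (3:Int)^0 < 3^p := pow_lt_pow_right₀ (by norm_num) (by omega)
        simp at this
        omega
    have hstep : (3:Int) ^ p * 3 = 3 ^ (p+1) := by ring
    have hgrow : (3:Int)^p < 3^(p+1) := by nlinarith
    have hrec := ih (number + 1 - 3 ^ (p+1)).toNat (by omega) (p+1)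
      (if PySem.Int.mod number (3 ^ p) = 0 ∧ (3:Int) ^ p ≠ 1 then (p : Int) else n) rfl
    have hpcast : ((p : Int) + 1) = ((p + 1 : Nat) : Int) := by push_cast; ring
    rw [hstep, hpcast, hrec]
    by_cases hc1 : p + 1 ≤ v ∧ 1 ≤ v
    · have h' : p ≤ v ∧ 1 ≤ v := ⟨by omega, hc1.2⟩
      rw [if_pos hc1, if_pos h']
    · by_cases hc2 : p ≤ v ∧ 1 ≤ v
      · have hpv : p = v := by omega
        have hcond' : PySem.Int.mod number (3 ^ p) = 0 ∧ (3:Int) ^ p ≠ 1 := by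
          rw [hcond]; omega
        rw [if_neg hc1, if_pos hcond', if_pos hc2, hpv]
      · have hcond' : ¬ (PySem.Int.mod number (3 ^ p) = 0 ∧ (3:Int) ^ p ≠ 1) := by
          rw [hcond]; omega
        rw [if_neg hc1, if_neg hcond', if_neg hc2]
  · have hres : ¬ (p ≤ v ∧ 1 ≤ v) := by
      rintro ⟨h1, _⟩
      apply hle
      calc (3:Int) ^ p ≤ 3 ^ v := pow_le_pow_right₀ (by norm_num) h1
        _ ≤ number := Int.le_of_dvd (by omega)
            ((dvd_iff_le_valAux number hm v).mpr (by rw [hv]))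
    split_ifs with h1 h2 <;>
      first
        | rfl
        | exact absurd h1.1 hle

-- ===== VERDICT (by name: the statement is the Claim_ definition above) =====
theorem spam_condition_spec : Claim_equal_spam_condition := by
  unfold Claim_equal_spam_condition
  intro number _
  unfold Spec_spam_condition spam_condition spam_condition_alt
  by_cases hpos : number ≤ 0
  · rw [spamLoopA]
    have hng : ¬ ((1 : Int) ≤ number ∧ (1:Int) ≤ 1) := by omega
    rw [dif_neg hng, if_pos hpos]
  · have hm : 1 ≤ number := by omega
    simp only [hpos, if_neg, not_false_iff]
    rw [spamLoopB_eq_valAux number 0]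
    have := spamLoopA_eq number hm 0 0
    norm_num at this
    rw [this]
    by_cases hv : 1 ≤ valAux number
    · simp [hv]
    · have h0 : valAux number = 0 := by omega
      simp [h0]
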